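-- pv_equiv track=rewrite | github.com/akharris381/6.009 | recipes.py | make_recipe_book
-- ===== SOURCE A (Python) =====
-- def make_recipe_book(recipes):
--     """
--     Given recipes, a list containing compound and atomic food items, make and
--     return a dictionary that maps each compound food item name to a list
--     of all the ingredient lists associated with that name.
--     """
--     recipe_book = {}
--     compound_foods = set()
--     for food in recipes:
--         if food[0] == "compound":
--             if food[1] not in compound_foods:
--                 recipe_book[food[1]] = [food[2]]
--                 compound_foods.add(food[1])
--             else:
--                 recipe_book[food[1]].append(food[2])
--
--     return recipe_book
-- ===== SOURCE B (Python) =====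
-- def make_recipe_book(recipes):
--     names = list(dict.fromkeys(food[1] for food in recipes if food[0] == "compound"))
--     return {name: [food[2] for food in recipes
--                    if food[0] == "compound" and food[1] == name]
--             for name in names}
-- ===== Notes on version B (the rewrite author's own statement) =====
-- stated objective: alternative
-- what changed: Replaces A's single hashing pass (dict plus seen-set with insert-vs-append branching) by first deduplicating the compound names in order of first occurrence and then building each name's ingredient list with one filtering scan over the recipes.
import Mathlib
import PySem

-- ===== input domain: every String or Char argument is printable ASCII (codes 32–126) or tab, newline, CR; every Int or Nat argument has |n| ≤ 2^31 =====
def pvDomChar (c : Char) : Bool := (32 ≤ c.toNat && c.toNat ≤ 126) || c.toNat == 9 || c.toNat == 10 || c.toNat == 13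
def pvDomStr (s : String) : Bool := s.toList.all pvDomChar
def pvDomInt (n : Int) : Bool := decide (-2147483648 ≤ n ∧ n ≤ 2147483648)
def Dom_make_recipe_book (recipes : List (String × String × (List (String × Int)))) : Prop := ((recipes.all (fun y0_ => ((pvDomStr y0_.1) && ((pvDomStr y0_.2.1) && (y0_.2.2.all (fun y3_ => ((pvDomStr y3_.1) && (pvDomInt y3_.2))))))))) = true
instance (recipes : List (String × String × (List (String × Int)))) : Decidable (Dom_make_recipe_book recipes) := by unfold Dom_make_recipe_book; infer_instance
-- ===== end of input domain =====

-- B replaces A's single hashing pass (dict + seen-set) by a dedup of the compound names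
-- followed by one filtering scan per distinct name (objective: alternative, not faster).

-- ===== PORT A =====
-- one pass: a dict of ingredient lists plus a seen-set deciding insert-vs-append
def make_recipe_book (recipes : List (String × String × (List (String × Int)))) : List (String × List (List (String × Int))) :=
  (recipes.foldl
    (fun (st : PySem.Dict String (List (List (String × Int))) × PySem.Set String) food =>
      if food.1 == "compound" then
        if PySem.Set.contains st.2 food.2.1 = false then
          (st.1.insert food.2.1 [food.2.2], PySem.Set.add st.2 food.2.1)
        else
          (st.1.modify food.2.1 [] (fun l => l ++ [food.2.2]), st.2)
      else st)
    (PySem.Dict.empty, PySem.Set.empty)).1.items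

-- ===== PORT B =====
-- distinct compound names in first-occurrence order, then one filtering scan per name
def make_recipe_book_alt (recipes : List (String × String × (List (String × Int)))) : List (String × List (List (String × Int))) :=
  let names := PySem.List.dedup ((recipes.filter (fun food => food.1 == "compound")).map (fun food => food.2.1))
  names.map (fun n =>
    (n, (recipes.filter (fun food => food.1 == "compound" && food.2.1 == n)).map (fun food => food.2.2)))

-- ===== PRECONDITION & SPEC =====
def Spec_make_recipe_book (recipes : List (String × String × (List (String × Int)))) (out : List (String × List (List (String × Int)))) : Prop := out = make_recipe_book_alt recipes
instance (recipes : List (String × String × (List (String × Int)))) (out : List (String × List (List (String × Int)))) : Decidable (Spec_make_recipe_book recipes out) := by unfold Spec_make_recipe_book; infer_instance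

-- ===== CLAIM (what is proved, stated in full; the proofs are below) =====
def Claim_equal_make_recipe_book : Prop := ∀ (recipes : List (String × String × (List (String × Int)))), Dom_make_recipe_book recipes → Spec_make_recipe_book recipes (make_recipe_book recipes)

-- ===== LEMMAS AND PROOFS =====

-- A's fold with its seen-set collapses to a plain modify-fold on the dict:
-- the set component is always exactly the dict's key list.
theorem pvA_fold_eq_modify (l : List (String × String × (List (String × Int))))
    (d : PySem.Dict String (List (List (String × Int)))) :
    l.foldl
      (fun (st : PySem.Dict String (List (List (String × Int))) × PySem.Set String) food =>
        if food.1 == "compound" then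
          if PySem.Set.contains st.2 food.2.1 = false then
            (st.1.insert food.2.1 [food.2.2], PySem.Set.add st.2 food.2.1)
          else
            (st.1.modify food.2.1 [] (fun l => l ++ [food.2.2]), st.2)
        else st) (d, d.keys)
    = (l.foldl
        (fun d food => if food.1 == "compound" then d.modify food.2.1 [] (fun l => l ++ [food.2.2]) else d) d,
       (l.foldl
        (fun d food => if food.1 == "compound" then d.modify food.2.1 [] (fun l => l ++ [food.2.2]) else d) d).keys) := by
  induction l generalizing d with
  | nil => rfl
  | cons f t ih =>
    simp only [List.foldl_cons]
    by_cases hc : f.1 == "compound"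
    · simp only [if_pos hc]
      by_cases hmem : PySem.Set.contains d.keys f.2.1 = false
      · have hnotmem : f.2.1 ∉ d.keys := by
          simpa [PySem.Set.contains] using hmem
        have hdc : d.contains f.2.1 = false := by
          rcases h : d.contains f.2.1 with _ | _
          · rfl
          · exact absurd ((PySem.Dict.contains_iff_mem_keys d f.2.1).mp h) hnotmem
        have hmod : d.modify f.2.1 [] (fun l => l ++ [f.2.2]) = d.insert f.2.1 [f.2.2] := by
          show d.insert f.2.1 (d.getD f.2.1 [] ++ [f.2.2]) = d.insert f.2.1 [f.2.2]
          rw [PySem.Dict.getD_of_not_contains d [] hdc]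
          simp
        have hkeys : (d.insert f.2.1 [f.2.2]).keys = PySem.Set.add d.keys f.2.1 := by
          rw [PySem.Dict.keys_insert_of_not_contains d [f.2.2] hdc,
              PySem.Set.add_of_not_mem hnotmem]
        rw [hmem, if_pos rfl, hmod, ← hkeys, ih]
      · have hmem' : PySem.Set.contains d.keys f.2.1 = true := by
          rcases h : PySem.Set.contains d.keys f.2.1 with _ | _
          · exact absurd h hmem
          · rfl
        have hdc : d.contains f.2.1 = true := by
          rw [PySem.Dict.contains_iff_mem_keys]
          simpa [PySem.Set.contains] using hmem'
        have hkeys : (d.modify f.2.1 [] (fun l => l ++ [f.2.2])).keys = d.keys := by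
          rw [PySem.Dict.keys_modify, PySem.Dict.keys_insert_of_contains _ _ hdc]
        rw [hmem', if_neg (by simp), ← hkeys, ih]
    · simp only [if_neg hc]; exact ih d

theorem make_recipe_book_spec : Claim_equal_make_recipe_book := by
  intro recipes _
  unfold Spec_make_recipe_book make_recipe_book make_recipe_book_alt
  simp only []
  rw [show (PySem.Set.empty : PySem.Set String)
        = (PySem.Dict.empty : PySem.Dict String (List (List (String × Int)))).keys from rfl,
      pvA_fold_eq_modify]
  -- the fold over all recipes is the fold over the compound entries, as (name, ingredients) pairs
  set ps : List (String × List (String × Int)) :=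
    (recipes.filter (fun food => food.1 == "compound")).map (fun food => (food.2.1, food.2.2)) with hps
  have hfold :
      recipes.foldl
        (fun d food => if food.1 == "compound" then d.modify food.2.1 [] (fun l => l ++ [food.2.2]) else d)
        PySem.Dict.empty
      = ps.foldl (fun d p => d.modify p.1 [] (fun l => l ++ [p.2])) PySem.Dict.empty := by
    rw [hps, List.foldl_map, List.foldl_filter]
  rw [hfold]
  set D := ps.foldl (fun d p => d.modify p.1 [] (fun l => l ++ [p.2])) PySem.Dict.empty with hD
  have hnd : D.keys.Nodup := by
    rw [hD]
    exact PySem.Dict.nodup_keys_foldl_modify_key ps (fun p => p.1) [] (fun _ p => (· ++ [p.2])) _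
      PySem.Dict.nodup_keys_empty
  rw [PySem.Dict.items_eq_map_keys D hnd []]
  have hkeys : D.keys = PySem.List.dedup ((recipes.filter (fun food => food.1 == "compound")).map (fun food => food.2.1)) := by
    rw [hD, PySem.Dict.keys_foldl_modify_key ps (fun p => p.1) [] (fun _ p => (· ++ [p.2]))]
    show PySem.Set.update PySem.Set.empty (ps.map (fun p => p.1)) = _
    rw [show PySem.Set.update (PySem.Set.empty : PySem.Set String) (ps.map (fun p => p.1))
          = PySem.Set.ofList (ps.map (fun p => p.1)) from (PySem.Set.ofList_eq_foldl _).symm]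
    simp [hps, List.map_map, Function.comp_def]
  rw [hkeys]
  apply List.map_congr_left
  intro n _
  have hget : D.getD n [] = (recipes.filter (fun food => food.1 == "compound" && food.2.1 == n)).map (fun food => food.2.2) := by
    rw [hD, PySem.Dict.getD_foldl_modify_append ps PySem.Dict.empty n]
    rw [hps, List.filter_map, List.map_map]
    rw [show (recipes.filter (fun food => food.1 == "compound" && food.2.1 == n))
          = ((recipes.filter (fun food => food.1 == "compound")).filter (fun food => food.2.1 == n)) by
        rw [List.filter_filter]
        exact List.filter_congr (fun a _ => Bool.and_comm _ _)]
    simp [PySem.Dict.getD_empty, Function.comp]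
  rw [hget]
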